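-- pv_equiv track=rewrite | github.com/leeshinbi/algorithm_study | 프로그래머스/unrated/120853. 컨트롤 제트/컨트롤 제트.py | solution
-- ===== SOURCE A (Python) =====
-- def solution(s):
--     numbers = s.split()
--     stack = []
--     answer = 0
--
--     for element in numbers:
--         if element == "Z":
--             POP = stack.pop() #POP 변수 설정
--             answer -= POP
--         else:
--             num = int(element)
--             stack.append(num)
--             answer += num
--
--     return answer
-- ===== SOURCE B (Python) =====
-- def solution(s):
--     # Right-to-left scan: count pending 'Z' cancellations; a number is added
--     # only if no later... (i.e. no Z to its right still pending) cancellation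
--     # consumes it. No stack, O(1) extra space.
--     total = 0
--     skip = 0
--     for element in reversed(s.split()):
--         if element == "Z":
--             skip += 1
--         elif skip > 0:
--             skip -= 1
--         else:
--             total += int(element)
--     return total
-- ===== Notes on version B (the rewrite author's own statement) =====
-- stated objective: alternative
-- what changed: Replaces the stack-and-running-total left scan by a right-to-left scan that keeps only a pending-cancellation counter: each 'Z' increments it, a number is skipped while it is positive, otherwise added; no stack is maintained at all (O(1) extra space).
import Mathlib
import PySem

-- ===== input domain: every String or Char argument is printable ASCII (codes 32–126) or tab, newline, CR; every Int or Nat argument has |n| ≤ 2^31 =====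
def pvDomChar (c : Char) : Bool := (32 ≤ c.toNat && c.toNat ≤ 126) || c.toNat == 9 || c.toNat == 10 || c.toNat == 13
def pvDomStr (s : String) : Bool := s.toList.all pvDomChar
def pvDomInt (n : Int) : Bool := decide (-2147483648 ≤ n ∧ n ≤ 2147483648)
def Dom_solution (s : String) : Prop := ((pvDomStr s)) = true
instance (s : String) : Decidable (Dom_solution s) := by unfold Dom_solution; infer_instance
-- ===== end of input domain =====

-- B replaces A's stack + running-total left scan by a right-to-left scan keeping only a
-- pending-cancellation counter (no stack, O(1) extra space); same results on Pre_.


-- ===== PORT A =====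
-- A's loop body: state is (stack, answer); pop from empty / unparsable int is a raise in
-- Python (none from the PySem primitive) — those inputs are excluded by Pre_solution and
-- the state is left unchanged there.
def solutionStepA (st : List Int × Int) (element : String) : List Int × Int :=
  if element == "Z" then
    match PySem.List.pop? st.1 (-1) with
    | some (POP, rest) => (rest, st.2 - POP)
    | none => st
  else
    match PySem.Int.ofStr? element with
    | some num => (st.1 ++ [num], st.2 + num)
    | none => st

def solution (s : String) : Int :=
  let numbers := PySem.Str.split₀ s
  (numbers.foldl solutionStepA ([], 0)).2

-- ===== PORT B =====
-- B's loop body over the reversed token list (foldr = rightmost token first), state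
-- (total, skip); int() on an unparsable token is a raise in Python — excluded by
-- Pre_solution, state left unchanged there.
def solutionRevStep (element : String) (st : Int × Nat) : Int × Nat :=
  if element == "Z" then (st.1, st.2 + 1)
  else if st.2 > 0 then (st.1, st.2 - 1)
  else
    match PySem.Int.ofStr? element with
    | some n => (st.1 + n, st.2)
    | none => st

def solution_alt (s : String) : Int :=
  ((PySem.Str.split₀ s).foldr solutionRevStep (0, 0)).1

-- ===== PRECONDITION & SPEC =====
-- Pre_ excludes exactly the inputs where A raises: a token that is neither "Z" nor an
-- int literal (ValueError), or a prefix with more "Z" tokens than numbers (pop from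
-- empty list, IndexError).
def Pre_solution (s : String) : Prop :=
  (∀ t ∈ PySem.Str.split₀ s, t = "Z" ∨ (PySem.Int.ofStr? t).isSome) ∧
  (∀ i ∈ List.range ((PySem.Str.split₀ s).length + 1),
    ((PySem.Str.split₀ s).take i).countP (· == "Z")
      ≤ ((PySem.Str.split₀ s).take i).countP (· != "Z"))
instance (s : String) : Decidable (Pre_solution s) := by unfold Pre_solution; infer_instance

def pvWitness_solution : String := "1 2 Z 3"

def Spec_solution (s : String) (out : Int) : Prop := out = solution_alt s
instance (s : String) (out : Int) : Decidable (Spec_solution s out) := by unfold Spec_solution; infer_instance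

-- ===== CLAIM (what is proved, stated in full; the proofs are below) =====
def Claim_equal_solution : Prop := ∀ (s : String), Dom_solution s → Pre_solution s → Spec_solution s (solution s)

-- ===== LEMMAS AND PROOFS =====

-- Proof-only helper: the stack component of A's step, with A's answer dropped.
def stackStep (stack : List Int) (element : String) : List Int :=
  if element == "Z" then
    match PySem.List.pop? stack (-1) with
    | some (_, rest) => rest
    | none => stack
  else
    match PySem.Int.ofStr? element with
    | some num => stack ++ [num]
    | none => stack

-- A's step preserves the invariant "answer = sum of stack".
lemma stepA_eq (stack : List Int) (t : String) :
    solutionStepA (stack, stack.sum) t = (stackStep stack t, (stackStep stack t).sum) := by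
  unfold solutionStepA stackStep
  by_cases hz : t == "Z"
  · simp only [hz, if_pos]
    induction stack using List.reverseRecOn with
    | nil => simp [PySem.List.pop?]
    | append_singleton ys y _ => simp [PySem.List.pop?_last]
  · simp only [hz, if_neg, Bool.false_eq_true, not_false_iff]
    cases PySem.Int.ofStr? t <;> simp

lemma fold_inv (toks : List String) (stack : List Int) :
    toks.foldl solutionStepA (stack, stack.sum)
      = (toks.foldl stackStep stack, (toks.foldl stackStep stack).sum) := by
  induction toks generalizing stack with
  | nil => rfl
  | cons t ts ih => simp only [List.foldl_cons, stepA_eq, ih]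

-- Core: the sum of A's final stack equals B's reverse-scan total plus the part of the
-- initial stack not consumed by B's leftover pending cancellations.
lemma fold_stack_rev (toks : List String) (stack : List Int)
    (hok : ∀ t ∈ toks, t = "Z" ∨ (PySem.Int.ofStr? t).isSome)
    (hbal : ∀ p, p <+: toks →
      p.countP (· == "Z") ≤ stack.length + p.countP (· != "Z")) :
    (toks.foldl stackStep stack).sum
      = (toks.foldr solutionRevStep (0, 0)).1
        + (stack.take (stack.length - (toks.foldr solutionRevStep (0, 0)).2)).sum := by
  induction toks generalizing stack with
  | nil => simp
  | cons t ts ih =>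
    have hokt := hok t (List.mem_cons_self ..)
    have hokts : ∀ u ∈ ts, u = "Z" ∨ (PySem.Int.ofStr? u).isSome :=
      fun u hu => hok u (List.mem_cons_of_mem _ hu)
    by_cases hz : t = "Z"
    · subst hz
      have h1 : (1 : Nat) ≤ stack.length := by
        have := hbal ["Z"] ⟨ts, rfl⟩
        simpa using this
      obtain ⟨ys, y, hstack⟩ := (List.eq_nil_or_concat stack).resolve_left (by
        rintro rfl; simp at h1)
      rw [List.concat_eq_append] at hstack
      subst hstack
      have hbal' : ∀ p, p <+: ts →
          p.countP (· == "Z") ≤ ys.length + p.countP (· != "Z") := by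
        intro p hp
        obtain ⟨q, hq⟩ := hp
        have h := hbal ("Z" :: p) ⟨q, by simp [hq]⟩
        simp only [List.countP_cons, List.length_append, List.length_cons,
          List.length_nil] at h
        simp at h
        omega
      have hih := ih ys hokts hbal'
      set r := ts.foldr solutionRevStep (0, 0) with hr
      have hstep : stackStep (ys ++ [y]) "Z" = ys := by
        simp [stackStep, PySem.List.pop?_last]
      have hrev : List.foldr solutionRevStep (0, 0) ("Z" :: ts) = (r.1, r.2 + 1) := by
        simp [List.foldr_cons, solutionRevStep, ← hr]
      have hlen : (ys ++ [y]).length - (r.2 + 1) = ys.length - r.2 := by simp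
      have htake : (ys ++ [y]).take ((ys ++ [y]).length - (r.2 + 1))
          = ys.take (ys.length - r.2) := by
        rw [hlen, List.take_append_of_le_length (Nat.sub_le _ _)]
      rw [List.foldl_cons, hstep, hrev, hih, htake]
    · rcases hokt with rfl | hsome
      · exact absurd rfl hz
      obtain ⟨n, hn⟩ := Option.isSome_iff_exists.mp hsome
      have hbz : (t == "Z") = false := by simp [hz]
      have hstep : stackStep stack t = stack ++ [n] := by
        simp [stackStep, hbz, hn]
      have hbal' : ∀ p, p <+: ts →
          p.countP (· == "Z") ≤ (stack ++ [n]).length + p.countP (· != "Z") := by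
        intro p hp
        obtain ⟨q, hq⟩ := hp
        have h := hbal (t :: p) ⟨q, by simp [hq]⟩
        simp [hz] at h ⊢
        omega
      have hih := ih (stack ++ [n]) hokts hbal'
      set r := ts.foldr solutionRevStep (0, 0) with hr
      rcases Nat.eq_zero_or_pos r.2 with h0 | hpos
      · have hrev : List.foldr solutionRevStep (0, 0) (t :: ts) = (r.1 + n, 0) := by
          simp [List.foldr_cons, solutionRevStep, ← hr, hbz, hn, h0]
        rw [List.foldl_cons, hstep, hrev, hih, h0]
        simp
        ring
      · have hrev : List.foldr solutionRevStep (0, 0) (t :: ts) = (r.1, r.2 - 1) := by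
          simp [List.foldr_cons, solutionRevStep, ← hr, hbz, hpos]
        have htake : (stack ++ [n]).take ((stack ++ [n]).length - r.2)
            = stack.take (stack.length - (r.2 - 1)) := by
          rw [List.take_append_of_le_length (by
            simp only [List.length_append, List.length_cons, List.length_nil]; omega)]
          congr 1
          simp only [List.length_append, List.length_cons, List.length_nil]
          omega
        rw [List.foldl_cons, hstep, hrev, hih, htake]

-- ===== VERDICT (by name: the statement is the Claim_ definition above) =====
theorem solution_spec : Claim_equal_solution := by
  intro s _ hpre
  unfold Spec_solution solution solution_alt
  obtain ⟨hok, hbal⟩ := hpre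
  set toks := PySem.Str.split₀ s with htoks
  show (toks.foldl solutionStepA ([], 0)).2 = (toks.foldr solutionRevStep (0, 0)).1
  have hbal' : ∀ p, p <+: toks →
      p.countP (· == "Z") ≤ ([] : List Int).length + p.countP (· != "Z") := by
    intro p hp
    have hlen : p.length ≤ toks.length := hp.length_le
    have := hbal p.length (List.mem_range.mpr (by omega))
    rw [List.prefix_iff_eq_take.mp hp]
    simpa using this
  have h1 := fold_inv toks []
  have h2 := fold_stack_rev toks [] hok hbal'
  simp only [List.sum_nil] at h1
  rw [h1]
  simpa using h2
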